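-- pv_equiv track=rewrite | github.com/huangjihui511/code-prediction4 | test3.py | split2pair
-- ===== SOURCE A (Python) =====
-- def split2pair(l):
--     result = []
--     for i in range(1, len(l)):
--         input = []
--         for j in range(i):
--             input += l[j]
--         output = l[i]
--         result.append((input.copy(),output.copy()))
--     return result
-- ===== SOURCE B (Python) =====
-- def split2pair(l):
--     result = []
--     prefix = []
--     for prev, cur in zip(l, l[1:]):
--         prefix = prefix + prev
--         result.append((prefix, cur.copy()))
--     return result
-- ===== Notes on version B (the rewrite author's own statement) =====
-- stated objective: alternative
-- what changed: Replaces the nested loop that rebuilds the prefix concatenation from scratch for each i with a single pass over zip(l, l[1:]) that maintains a running prefix accumulator.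
import Mathlib
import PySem

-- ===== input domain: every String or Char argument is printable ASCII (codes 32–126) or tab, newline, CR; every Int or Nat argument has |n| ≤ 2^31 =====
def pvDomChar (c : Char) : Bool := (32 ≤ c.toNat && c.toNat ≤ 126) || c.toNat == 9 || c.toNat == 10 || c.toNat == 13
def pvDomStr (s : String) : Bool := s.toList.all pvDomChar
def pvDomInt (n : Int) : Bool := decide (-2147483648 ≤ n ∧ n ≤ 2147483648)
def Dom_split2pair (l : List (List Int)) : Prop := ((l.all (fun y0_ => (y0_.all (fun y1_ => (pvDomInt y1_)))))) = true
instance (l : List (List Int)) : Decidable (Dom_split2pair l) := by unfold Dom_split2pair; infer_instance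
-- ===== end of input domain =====

-- B replaces A's nested prefix-rebuilding loops with one pass over zip(l, l[1:]) maintaining a running prefix (alternative decomposition).


-- ===== PORT A =====
-- Literal port of A: outer loop over range(1, len(l)); inner loop rebuilds the
-- prefix concatenation from scratch with input += l[j].
def split2pair (l : List (List Int)) : List (List Int × List Int) :=
  (PySem.List.pyRange 1 (l.length : Int) 1).foldl
    (fun result i =>
      let input := (PySem.List.pyRange 0 i 1).foldl
        (fun inp j => inp ++ PySem.List.pyGetD l j []) []
      let output := PySem.List.pyGetD l i []
      result ++ [(input, output)])
    []

-- ===== PORT B =====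
-- Port of B: a single pass over zip(l, l[1:]) maintaining the running prefix.
def split2pair_alt (l : List (List Int)) : List (List Int × List Int) :=
  ((l.zip (l.drop 1)).foldl
    (fun s p => (s.1 ++ p.1, s.2 ++ [(s.1 ++ p.1, p.2)]))
    ([], [])).2

-- ===== PRECONDITION & SPEC =====
def Spec_split2pair (l : List (List Int)) (out : List (List Int × List Int)) : Prop := out = split2pair_alt l
instance (l : List (List Int)) (out : List (List Int × List Int)) : Decidable (Spec_split2pair l out) := by unfold Spec_split2pair; infer_instance

-- ===== CLAIM (what is proved, stated in full; the proofs are below) =====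
def Claim_equal_split2pair : Prop := ∀ (l : List (List Int)), Dom_split2pair l → Spec_split2pair l (split2pair l)

-- ===== LEMMAS AND PROOFS =====

-- closed form of both ports: element k is (flatten of the first k+1 rows, row k+1)
def pvSpecList (l : List (List Int)) : List (List Int × List Int) :=
  (List.range (l.length - 1)).map
    (fun k => ((l.take (k+1)).flatten, l.getD (k+1) []))

lemma inner_fold_eq (l : List (List Int)) (m : Nat) (hm : m ≤ l.length) (init : List Int) :
    (PySem.List.pyRange 0 (m : Int) 1).foldl
      (fun inp j => inp ++ PySem.List.pyGetD l j []) init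
      = init ++ (l.take m).flatten := by
  induction m generalizing init with
  | zero => simp [PySem.List.pyRange_one_eq_nil]
  | succ n ih =>
    have h1 : ((n : Int)) ≤ ((n : Int) + 1) := by omega
    have : ((n + 1 : Nat) : Int) = (n : Int) + 1 := by push_cast; ring
    rw [this, PySem.List.pyRange_one_succ_right (by positivity), List.foldl_append]
    rw [ih (by omega)]
    have hn : n < l.length := by omega
    simp only [List.foldl_cons, List.foldl_nil]
    rw [PySem.List.pyGetD_natCast, List.take_add_one, List.append_assoc]
    rw [List.flatten_append, List.getD_eq_getElem?_getD, List.getElem?_eq_getElem hn]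
    simp

lemma portA_eq_spec (l : List (List Int)) : split2pair l = pvSpecList l := by
  unfold split2pair pvSpecList
  rw [PySem.List.foldl_append_singleton_eq_map, PySem.List.pyRange_one]
  rw [List.map_map]
  simp only [List.nil_append]
  have hlen : ((l.length : Int) - 1).toNat = l.length - 1 := by omega
  rw [hlen]
  apply List.map_congr_left
  intro k hk
  simp only [List.mem_range] at hk
  have hk1 : k + 1 ≤ l.length := by omega
  have h1k : (1 : Int) + (k : Int) = ((k + 1 : Nat) : Int) := by push_cast; ring
  simp only [Function.comp_apply, h1k]
  rw [inner_fold_eq l (k+1) hk1]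
  rw [List.nil_append, PySem.List.pyGetD_natCast, List.getD_eq_getElem?_getD]

lemma portB_go (l : List (List Int)) (pre : List Int) (res : List (List Int × List Int)) :
    ((l.zip (l.drop 1)).foldl
      (fun s p => (s.1 ++ p.1, s.2 ++ [(s.1 ++ p.1, p.2)]))
      (pre, res)).2
      = res ++ (List.range (l.length - 1)).map
          (fun k => (pre ++ (l.take (k+1)).flatten, l.getD (k+1) [])) := by
  induction l generalizing pre res with
  | nil => simp
  | cons a t ih =>
    cases t with
    | nil => simp
    | cons b t' =>
      simp only [List.drop_succ_cons, List.drop_zero, List.zip_cons_cons, List.foldl_cons]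
      simp only [List.drop_succ_cons, List.drop_zero] at ih
      rw [ih (pre ++ a) (res ++ [(pre ++ a, b)])]
      simp only [List.length_cons, Nat.add_sub_cancel]
      rw [List.range_succ_eq_map, List.map_cons, List.map_map]
      simp [List.append_assoc, Function.comp]

lemma portB_eq_spec (l : List (List Int)) : split2pair_alt l = pvSpecList l := by
  unfold split2pair_alt pvSpecList
  rw [portB_go l [] []]
  simp

-- ===== VERDICT (by name: the statement is the Claim_ definition above) =====
theorem split2pair_spec : Claim_equal_split2pair := by
  intro l _
  unfold Spec_split2pair
  rw [portA_eq_spec, portB_eq_spec]
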